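-- pv_equiv track=rewrite | github.com/arpan404/alethic-reasoning-engine | agents/email/tools.py | validate_email_content
-- ===== SOURCE A (Python) =====
-- from typing import Any, Dict, List, Optional
--
-- def validate_email_content(
--     subject: str,
--     body: str,
--     required_elements: Optional[List[str]] = None,
-- ) -> tuple[bool, Optional[str]]:
--     """Validate email content.
--
--     Args:
--         subject: Email subject
--         body: Email body
--         required_elements: Optional list of required elements
--
--     Returns:
--         Tuple of (is_valid, error_message)
--     """
--     if not subject or not subject.strip():
--         return False, "Subject cannot be empty"
--
--     if not body or not body.strip():
--         return False, "Body cannot be empty"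
--
--     if len(subject) > 200:
--         return False, "Subject too long (max 200 characters)"
--
--     if len(body) < 50:
--         return False, "Body too short (min 50 characters)"
--
--     if required_elements:
--         body_lower = body.lower()
--         for element in required_elements:
--             if element.lower() not in body_lower:
--                 return False, f"Required element missing: {element}"
--
--     return True, None
-- ===== SOURCE B (Python) =====
-- from typing import Any, Dict, List, Optional
--
--
-- def validate_email_content(
--     subject: str,
--     body: str,
--     required_elements: Optional[List[str]] = None,
-- ) -> tuple:
--     # Eagerly evaluate every check and collect ALL failure messages, then report the first.
--     checks = [
--         (not subject or not subject.strip(), "Subject cannot be empty"),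
--         (not body or not body.strip(), "Body cannot be empty"),
--         (len(subject) > 200, "Subject too long (max 200 characters)"),
--         (len(body) < 50, "Body too short (min 50 characters)"),
--     ]
--     errors = [msg for failed, msg in checks if failed]
--     if required_elements:
--         body_lower = body.lower()
--         errors.extend(
--             f"Required element missing: {e}"
--             for e in required_elements
--             if e.lower() not in body_lower
--         )
--     return (False, errors[0]) if errors else (True, None)
-- ===== Notes on version B (the rewrite author's own statement) =====
-- stated objective: alternative
-- what changed: B evaluates every validation check and every required element eagerly, accumulating all failure messages into one error list and returning its head, instead of A's short-circuiting early-return guard chain that stops at the first failure.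
import Mathlib
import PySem

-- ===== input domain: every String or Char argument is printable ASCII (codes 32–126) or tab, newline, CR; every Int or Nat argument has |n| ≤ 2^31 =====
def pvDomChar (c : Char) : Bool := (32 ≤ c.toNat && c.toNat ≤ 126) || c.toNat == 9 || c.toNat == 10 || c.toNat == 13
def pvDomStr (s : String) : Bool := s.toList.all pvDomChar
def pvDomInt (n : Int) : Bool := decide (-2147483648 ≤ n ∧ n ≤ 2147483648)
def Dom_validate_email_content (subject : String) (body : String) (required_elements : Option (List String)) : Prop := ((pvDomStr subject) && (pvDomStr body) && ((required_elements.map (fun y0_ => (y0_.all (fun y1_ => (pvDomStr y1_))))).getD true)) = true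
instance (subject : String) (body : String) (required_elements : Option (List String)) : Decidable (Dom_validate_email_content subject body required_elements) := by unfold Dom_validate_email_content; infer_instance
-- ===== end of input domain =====

-- B replaces A's short-circuiting early-return guard chain by an eager accumulation of ALL
-- failure messages into one error list, returning its head (objective: alternative decomposition).

-- ===== PORT A =====
-- A's `for element in required_elements` loop, returning at the first missing element.
def pvLoopA (body_lower : String) : List String → Bool × Option String
  | [] => (true, none)
  | e :: rest =>
    if !(PySem.Str.isIn (PySem.Str.lower e) body_lower) then
      (false, some ("Required element missing: " ++ e))
    else
      pvLoopA body_lower rest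

def validate_email_content (subject : String) (body : String) (required_elements : Option (List String)) : Bool × Option String :=
  if subject == "" || PySem.Str.strip subject == "" then
    (false, some "Subject cannot be empty")
  else if body == "" || PySem.Str.strip body == "" then
    (false, some "Body cannot be empty")
  else if 200 < PySem.Str.len subject then
    (false, some "Subject too long (max 200 characters)")
  else if PySem.Str.len body < 50 then
    (false, some "Body too short (min 50 characters)")
  else
    -- `if required_elements:` — None and the empty list are falsy, skipping the loop
    match required_elements with
    | none => (true, none)
    | some es =>
      if es == [] then (true, none)
      else
        let body_lower := PySem.Str.lower body
        pvLoopA body_lower es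

-- ===== PORT B =====
-- the eagerly evaluated checks list: (failed?, message)
def pvChecks (subject body : String) : List (Bool × String) :=
  [ (subject == "" || PySem.Str.strip subject == "", "Subject cannot be empty"),
    (body == "" || PySem.Str.strip body == "", "Body cannot be empty"),
    (decide (200 < PySem.Str.len subject), "Subject too long (max 200 characters)"),
    (decide (PySem.Str.len body < 50), "Body too short (min 50 characters)") ]

-- the comprehension [msg for failed, msg in checks if failed]
def pvBaseErrors (subject body : String) : List String :=
  (pvChecks subject body).filterMap (fun c => if c.1 then some c.2 else none)

-- the generator: messages for ALL required elements absent from body_lower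
def pvMissingMsgs (body_lower : String) (es : List String) : List String :=
  es.filterMap (fun e =>
    if !(PySem.Str.isIn (PySem.Str.lower e) body_lower) then
      some ("Required element missing: " ++ e)
    else none)

def pvErrors (subject body : String) (required_elements : Option (List String)) : List String :=
  let errors := pvBaseErrors subject body
  match required_elements with
  | none => errors
  | some es =>
    if es == [] then errors
    else errors ++ pvMissingMsgs (PySem.Str.lower body) es

def validate_email_content_alt (subject : String) (body : String) (required_elements : Option (List String)) : Bool × Option String :=
  match pvErrors subject body required_elements with
  | [] => (true, none)
  | e :: _ => (false, some e)

-- ===== PRECONDITION & SPEC =====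
def Spec_validate_email_content (subject : String) (body : String) (required_elements : Option (List String)) (out : Bool × Option String) : Prop := out = validate_email_content_alt subject body required_elements
instance (subject : String) (body : String) (required_elements : Option (List String)) (out : Bool × Option String) : Decidable (Spec_validate_email_content subject body required_elements out) := by unfold Spec_validate_email_content; infer_instance

-- ===== CLAIM (what is proved, stated in full; the proofs are below) =====
def Claim_equal_validate_email_content : Prop := ∀ (subject : String) (body : String) (required_elements : Option (List String)), Dom_validate_email_content subject body required_elements → Spec_validate_email_content subject body required_elements (validate_email_content subject body required_elements)

-- ===== LEMMAS AND PROOFS =====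

-- A's early-return element loop equals the head of B's full missing-message list
theorem pvLoopA_eq (bl : String) (es : List String) :
    pvLoopA bl es =
      match pvMissingMsgs bl es with
      | [] => (true, none)
      | m :: _ => (false, some m) := by
  induction es with
  | nil => rfl
  | cons e rest ih =>
    simp only [pvLoopA, pvMissingMsgs, List.filterMap]
    split_ifs with h
    · rfl
    · simpa [pvMissingMsgs] using ih

-- ===== VERDICT (by name: the statement is the Claim_ definition above) =====
theorem validate_email_content_spec : Claim_equal_validate_email_content := by
  intro subject body required_elements _
  unfold Spec_validate_email_content validate_email_content validate_email_content_alt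
    pvErrors pvBaseErrors pvChecks
  cases h1 : (subject == "" || PySem.Str.strip subject == "") with
  | true =>
    cases required_elements with
    | none => simp [h1]
    | some es => by_cases he : es = [] <;> simp [h1, he]
  | false =>
    cases h2 : (body == "" || PySem.Str.strip body == "") with
    | true =>
      cases required_elements with
      | none => simp [h1, h2]
      | some es => by_cases he : es = [] <;> simp [h1, h2, he]
    | false =>
      by_cases hL : 200 < PySem.Str.len subject
      all_goals simp [PySem.Str.len_eq] at hL
      · cases required_elements with
        | none => simp [h1, h2, hL]
        | some es => by_cases he : es = [] <;> simp [h1, h2, hL, he]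
      · by_cases hB : PySem.Str.len body < 50
        all_goals simp [PySem.Str.len_eq] at hB
        all_goals try have hL' : ¬ (200:Int) < (subject.length : Int) := by omega
        · cases required_elements with
          | none => simp [h1, h2, hL, hB]
          | some es => by_cases he : es = [] <;> simp [h1, h2, hL, hB, he]
        · have hB' : ¬ ((body.length : Int) < 50) := by omega
          cases required_elements with
          | none => simp [h1, h2, hL', hB']
          | some es =>
            by_cases he : es = []
            · simp [h1, h2, hL', hB', he]
            · simp [h1, h2, hL', hB', he, pvLoopA_eq]
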